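-- pv_equiv track=rewrite | github.com/driessamyn/advent-of-code-2024 | day12/plot.py | dfs
-- ===== SOURCE A (Python) =====
-- def dfs(plot_map, pos, seen):
--     name = plot_map[pos]
--     region = []  # positions in this region
--     fence = []   # fence positions and their directions
--     to_visit = [pos]  # stack for DFS
--     visited = set([pos])
--     seen.add(pos)
--
--     while to_visit:
--         current = to_visit.pop()
--         region.append(current)
--         r, c = current
--
--         for n in neighbours:
--             new_pos = (r + n[0], c + n[1])
--             if new_pos in visited:
--                 continue
--
--             if new_pos in plot_map and plot_map[new_pos] == name:
--                 # Same region - add to DFS stack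
--                 visited.add(new_pos)
--                 seen.add(new_pos)
--                 to_visit.append(new_pos)
--             else:
--                 # Boundary position - add to fence
--                 fence.append((new_pos, n))
--
--     return region, fence
--
-- neighbours = ((1,0),(-1,0),(0,-1),(0,1))
-- ===== SOURCE B (Python) =====
-- def dfs(plot_map, pos, seen):
--     name = plot_map[pos]
--     # pass 1: DFS collects the region only (same pop order, same visited/seen updates)
--     region = []
--     to_visit = [pos]
--     visited = set([pos])
--     seen.add(pos)
--     while to_visit:
--         current = to_visit.pop()
--         region.append(current)
--         r, c = current
--         for dr, dc in neighbours:
--             np = (r + dr, c + dc)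
--             if np not in visited and plot_map.get(np) == name:
--                 visited.add(np)
--                 seen.add(np)
--                 to_visit.append(np)
--     # pass 2: fence edges read straight off the map, independent of the DFS bookkeeping
--     fence = [((r + dr, c + dc), (dr, dc))
--              for (r, c) in region
--              for (dr, dc) in neighbours
--              if plot_map.get((r + dr, c + dc)) != name]
--     return region, fence
--
-- neighbours = ((1, 0), (-1, 0), (0, -1), (0, 1))
-- ===== Notes on version B (the rewrite author's own statement) =====
-- stated objective: alternative
-- what changed: B splits A's interleaved flood-fill into two passes: a DFS that only collects the region, then a separate sweep over the region that reads fence edges directly off the map (plot_map.get(np) != name), dropping A's visited-set test from the fence decision entirely.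
import Mathlib
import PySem

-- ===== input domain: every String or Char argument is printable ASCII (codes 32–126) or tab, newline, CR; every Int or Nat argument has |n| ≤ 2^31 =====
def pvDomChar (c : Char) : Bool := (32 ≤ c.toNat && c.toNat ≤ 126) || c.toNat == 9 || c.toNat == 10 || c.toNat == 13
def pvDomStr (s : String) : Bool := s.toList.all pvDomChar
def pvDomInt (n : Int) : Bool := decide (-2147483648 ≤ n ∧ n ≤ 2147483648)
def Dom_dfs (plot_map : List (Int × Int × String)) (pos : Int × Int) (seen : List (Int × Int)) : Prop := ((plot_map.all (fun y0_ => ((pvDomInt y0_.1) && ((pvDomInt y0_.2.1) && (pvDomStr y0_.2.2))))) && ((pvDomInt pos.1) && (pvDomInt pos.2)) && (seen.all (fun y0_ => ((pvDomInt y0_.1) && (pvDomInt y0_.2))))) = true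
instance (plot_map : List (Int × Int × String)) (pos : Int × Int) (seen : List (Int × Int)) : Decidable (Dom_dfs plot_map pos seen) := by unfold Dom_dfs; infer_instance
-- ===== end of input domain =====

-- B restructures A's interleaved flood-fill into two passes: the DFS collects only the region,
-- and the fence is then read straight off the map (plot_map.get(np) != name) instead of being
-- interleaved with the visited-set bookkeeping.  Equivalence is about the RETURN value; both A
-- and B mutate `seen` identically (adding every region cell), which the ports do not model.

-- ===== PORT A =====
-- dict primitive shared by both ports: Python dict lookup on the association list (first match)
def pmGet? : List (Int × Int × String) → (Int × Int) → Option String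
  | [], _ => none
  | p :: rest, k => if p.1 = k.1 ∧ p.2.1 = k.2 then some p.2.2 else pmGet? rest k

-- the module constant `neighbours`
def neighboursL : List (Int × Int) := [(1, 0), (-1, 0), (0, -1), (0, 1)]

-- number of keys of plot_map not yet visited (termination measure only, not part of either algorithm)
def unvis (pm : List (Int × Int × String)) (v : PySem.Set (Int × Int)) : Nat :=
  ((PySem.Set.ofList (pm.map (fun p => (p.1, p.2.1)))).filter (fun k => !(PySem.Set.contains v k))).length

-- A's inner `for n in neighbours` loop for the popped cell (r, c);
-- `new_pos in plot_map and plot_map[new_pos] == name` is exactly `pmGet? pm np = some name`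
def stepA (pm : List (Int × Int × String)) (name : String) (r c : Int) :
    List (Int × Int) →
    PySem.Set (Int × Int) × List (Int × Int) × List ((Int × Int) × (Int × Int)) →
    PySem.Set (Int × Int) × List (Int × Int) × List ((Int × Int) × (Int × Int))
  | [], st => st
  | n :: ns, (v, tv, f) =>
    let np := (r + n.1, c + n.2)
    if np ∈ v then stepA pm name r c ns (v, tv, f)
    else if pmGet? pm np = some name then stepA pm name r c ns (PySem.Set.add v np, np :: tv, f)
    else stepA pm name r c ns (v, tv, f ++ [(np, n)])

-- A's `while to_visit` loop (stack represented with its top at the head).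
-- `fuel` is a pure totality guard (structural recursion the kernel can evaluate): the callers pass
-- fuel = tv.length + 2 * unvis, which strictly dominates the loop measure (stepA_measure), so the
-- fuel-0 branch is never reached on any input.
def loopA (pm : List (Int × Int × String)) (name : String) :
    Nat → List (Int × Int) → PySem.Set (Int × Int) → List (Int × Int) →
    List ((Int × Int) × (Int × Int)) → (List (Int × Int)) × (List ((Int × Int) × (Int × Int)))
  | _, [], _, reg, f => (reg, f)
  | 0, _ :: _, _, reg, f => (reg, f)  -- unreachable: fuel always ≥ the measure
  | fuel + 1, cur :: rest, v, reg, f =>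
    let s := stepA pm name cur.1 cur.2 neighboursL (v, rest, f)
    loopA pm name fuel s.2.1 s.1 (reg ++ [cur]) s.2.2

def dfs (plot_map : List (Int × Int × String)) (pos : Int × Int) (seen : List (Int × Int)) :
    (List (Int × Int)) × (List ((Int × Int) × (Int × Int))) :=
  -- Python raises KeyError on `plot_map[pos]` when pos is no key: excluded by Pre_dfs
  let name := (pmGet? plot_map pos).getD ""
  let visited := PySem.Set.ofList [pos]
  loopA plot_map name (1 + 2 * unvis plot_map visited) [pos] visited [] []

-- ===== PORT B =====
-- B's pass-1 inner loop: only visited/stack, no fence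
def stepB (pm : List (Int × Int × String)) (name : String) (r c : Int) :
    List (Int × Int) → PySem.Set (Int × Int) × List (Int × Int) →
    PySem.Set (Int × Int) × List (Int × Int)
  | [], st => st
  | n :: ns, (v, tv) =>
    let np := (r + n.1, c + n.2)
    if np ∉ v ∧ pmGet? pm np = some name then stepB pm name r c ns (PySem.Set.add v np, np :: tv)
    else stepB pm name r c ns (v, tv)

-- B's pass-1 `while to_visit` loop: region only (same fuel guard as loopA, never reached)
def loopB (pm : List (Int × Int × String)) (name : String) :
    Nat → List (Int × Int) → PySem.Set (Int × Int) → List (Int × Int) → List (Int × Int)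
  | _, [], _, reg => reg
  | 0, _ :: _, _, reg => reg  -- unreachable: fuel always ≥ the measure
  | fuel + 1, cur :: rest, v, reg =>
    let s := stepB pm name cur.1 cur.2 neighboursL (v, rest)
    loopB pm name fuel s.2 s.1 (reg ++ [cur])

-- B's pass-2 comprehension, for one region cell
def cellFence (pm : List (Int × Int × String)) (name : String) (cell : Int × Int) :
    List ((Int × Int) × (Int × Int)) :=
  neighboursL.filterMap (fun n =>
    if pmGet? pm (cell.1 + n.1, cell.2 + n.2) ≠ some name
    then some ((cell.1 + n.1, cell.2 + n.2), n) else none)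

def dfs_alt (plot_map : List (Int × Int × String)) (pos : Int × Int) (seen : List (Int × Int)) :
    (List (Int × Int)) × (List ((Int × Int) × (Int × Int))) :=
  let name := (pmGet? plot_map pos).getD ""
  let visited := PySem.Set.ofList [pos]
  let region := loopB plot_map name (1 + 2 * unvis plot_map visited) [pos] visited []
  (region, region.flatMap (cellFence plot_map name))

-- ===== PRECONDITION & SPEC =====
-- Pre_: pos must be a key of plot_map; otherwise `plot_map[pos]` raises KeyError (in A and in B alike)
def Pre_dfs (plot_map : List (Int × Int × String)) (pos : Int × Int) (seen : List (Int × Int)) : Prop :=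
  pos ∈ plot_map.map (fun p => (p.1, p.2.1))
instance (plot_map : List (Int × Int × String)) (pos : Int × Int) (seen : List (Int × Int)) : Decidable (Pre_dfs plot_map pos seen) := by unfold Pre_dfs; infer_instance

def pvWitness_dfs : (List (Int × Int × String)) × (Int × Int) × (List (Int × Int)) :=
  ([(0, 0, "A"), (0, 1, "A"), (1, 0, "B")], (0, 0), [])

def Spec_dfs (plot_map : List (Int × Int × String)) (pos : Int × Int) (seen : List (Int × Int)) (out : (List (Int × Int)) × (List ((Int × Int) × (Int × Int)))) : Prop := out = dfs_alt plot_map pos seen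
instance (plot_map : List (Int × Int × String)) (pos : Int × Int) (seen : List (Int × Int)) (out : (List (Int × Int)) × (List ((Int × Int) × (Int × Int)))) : Decidable (Spec_dfs plot_map pos seen out) := by unfold Spec_dfs; infer_instance

-- ===== CLAIM (what is proved, stated in full; the proofs are below) =====
def Claim_equal_dfs : Prop := ∀ (plot_map : List (Int × Int × String)) (pos : Int × Int) (seen : List (Int × Int)), Dom_dfs plot_map pos seen → Pre_dfs plot_map pos seen → Spec_dfs plot_map pos seen (dfs plot_map pos seen)

-- ===== LEMMAS AND PROOFS =====

theorem filter_len_le {α : Type} (p q : α → Bool) (himp : ∀ a, q a = true → p a = true) :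
    ∀ l : List α, (l.filter q).length ≤ (l.filter p).length := by
  intro l
  induction l with
  | nil => simp
  | cons b m ihm =>
    by_cases hq : q b = true
    · simp [hq, himp b hq]; omega
    · simp only [Bool.not_eq_true] at hq
      rcases Bool.eq_false_or_eq_true (p b) with hp | hp <;>
        simp [hq, hp] <;> omega

theorem filter_len_lt {α : Type} (p q : α → Bool) (himp : ∀ a, q a = true → p a = true)
    (x : α) (hpx : p x = true) (hqx : q x = false) :
    ∀ l : List α, x ∈ l → (l.filter q).length < (l.filter p).length := by
  intro l hx
  induction l with
  | nil => simp at hx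
  | cons a l ih =>
    rcases List.mem_cons.mp hx with rfl | hmem
    · have e1 : List.filter p (x :: l) = x :: List.filter p l := by simp [hpx]
      have e2 : List.filter q (x :: l) = List.filter q l := by simp [hqx]
      rw [e1, e2, List.length_cons]
      exact Nat.lt_succ_of_le (filter_len_le p q himp l)
    · have hlt := ih hmem
      by_cases hq : q a = true
      · simp [hq, himp a hq]; omega
      · simp only [Bool.not_eq_true] at hq
        rcases Bool.eq_false_or_eq_true (p a) with hp | hp <;>
          simp [hq, hp] <;> omega

theorem mem_keys_of_pmGet? (pm : List (Int × Int × String)) (k : Int × Int) (s : String)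
    (hg : pmGet? pm k = some s) : k ∈ pm.map (fun p => (p.1, p.2.1)) := by
  induction pm with
  | nil => simp [pmGet?] at hg
  | cons p rest ih =>
    simp only [pmGet?] at hg
    simp only [List.map_cons, List.mem_cons]
    split at hg
    · rename_i h
      exact Or.inl (by rw [h.1, h.2])
    · exact Or.inr (ih hg)

theorem unvis_add_lt (pm : List (Int × Int × String)) (name : String) (v : PySem.Set (Int × Int))
    (np : Int × Int) (hg : pmGet? pm np = some name) (hnv : np ∉ v) :
    unvis pm (PySem.Set.add v np) < unvis pm v := by
  have hmem : np ∈ PySem.Set.ofList (pm.map (fun p => (p.1, p.2.1))) :=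
    (PySem.Set.mem_ofList _ _).mpr (mem_keys_of_pmGet? pm np name hg)
  unfold unvis
  rw [PySem.Set.add_of_not_mem hnv]
  have himp : ∀ a : Int × Int,
      (!(PySem.Set.contains (v ++ [np]) a)) = true → (!(PySem.Set.contains v a)) = true := by
    intro a ha
    simp only [PySem.Set.contains_eq_listContains, List.contains_eq_mem, Bool.not_eq_true',
      decide_eq_false_iff_not] at ha ⊢
    exact fun h => ha (List.mem_append.mpr (Or.inl h))
  have hp : (!(PySem.Set.contains v np)) = true := by
    simp [PySem.Set.contains_eq_listContains, List.contains_eq_mem, hnv]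
  have hq : (!(PySem.Set.contains (v ++ [np]) np)) = false := by
    simp [PySem.Set.contains_eq_listContains, List.contains_eq_mem]
  exact filter_len_lt _ _ himp np hp hq _ hmem

theorem stepA_measure (pm : List (Int × Int × String)) (name : String) (r c : Int) :
    ∀ (ns : List (Int × Int)) (v : PySem.Set (Int × Int)) (tv : List (Int × Int))
      (f : List ((Int × Int) × (Int × Int))),
    (stepA pm name r c ns (v, tv, f)).2.1.length + 2 * unvis pm (stepA pm name r c ns (v, tv, f)).1
      ≤ tv.length + 2 * unvis pm v := by
  intro ns
  induction ns with
  | nil => intro v tv f; simp [stepA]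
  | cons n ns ih =>
    intro v tv f
    simp only [stepA]
    split
    · exact ih v tv f
    · split
      · rename_i hnv hg
        have h1 := ih (PySem.Set.add v (r + n.1, c + n.2)) ((r + n.1, c + n.2) :: tv) f
        have h2 := unvis_add_lt pm name v (r + n.1, c + n.2) hg hnv
        simp only [List.length_cons] at h1
        omega
      · exact ih v tv (f ++ [((r + n.1, c + n.2), n)])


-- invariant: every visited cell has the region's name
def RegInv (pm : List (Int × Int × String)) (name : String) (v : PySem.Set (Int × Int)) : Prop :=
  ∀ x ∈ v, pmGet? pm x = some name

theorem stepAB (pm : List (Int × Int × String)) (name : String) (r c : Int) :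
    ∀ (ns : List (Int × Int)) (v : PySem.Set (Int × Int)) (tv : List (Int × Int))
      (f : List ((Int × Int) × (Int × Int))),
    (stepA pm name r c ns (v, tv, f)).1 = (stepB pm name r c ns (v, tv)).1 ∧
    (stepA pm name r c ns (v, tv, f)).2.1 = (stepB pm name r c ns (v, tv)).2 := by
  intro ns
  induction ns with
  | nil => intro v tv f; exact ⟨rfl, rfl⟩
  | cons n ns ih =>
    intro v tv f
    simp only [stepA, stepB]
    by_cases h1 : (r + n.1, c + n.2) ∈ v
    · rw [if_pos h1, if_neg (fun hc => hc.1 h1)]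
      exact ih v tv f
    · by_cases h2 : pmGet? pm (r + n.1, c + n.2) = some name
      · rw [if_neg h1, if_pos h2, if_pos ⟨h1, h2⟩]
        exact ih _ _ f
      · rw [if_neg h1, if_neg h2, if_neg (fun hc => h2 hc.2)]
        exact ih v tv _

theorem stepB_inv (pm : List (Int × Int × String)) (name : String) (r c : Int) :
    ∀ (ns : List (Int × Int)) (v : PySem.Set (Int × Int)) (tv : List (Int × Int)),
    RegInv pm name v → RegInv pm name (stepB pm name r c ns (v, tv)).1 := by
  intro ns
  induction ns with
  | nil => intro v tv h; exact h
  | cons n ns ih =>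
    intro v tv h
    simp only [stepB]
    split
    · rename_i hc
      apply ih
      intro x hx
      rcases (PySem.Set.mem_add _ _ _).mp hx with hv | hnp
      · exact h x hv
      · rw [hnp]; exact hc.2
    · exact ih v tv h

theorem stepA_fence (pm : List (Int × Int × String)) (name : String) (r c : Int) :
    ∀ (ns : List (Int × Int)) (v : PySem.Set (Int × Int)) (tv : List (Int × Int))
      (f : List ((Int × Int) × (Int × Int))), RegInv pm name v →
    (stepA pm name r c ns (v, tv, f)).2.2 =
      f ++ ns.filterMap (fun n =>
        if pmGet? pm (r + n.1, c + n.2) ≠ some name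
        then some ((r + n.1, c + n.2), n) else none) := by
  intro ns
  induction ns with
  | nil => intro v tv f _; simp [stepA]
  | cons n ns ih =>
    intro v tv f hInv
    simp only [stepA]
    by_cases h1 : (r + n.1, c + n.2) ∈ v
    · have hg := hInv _ h1
      rw [if_pos h1, ih v tv f hInv]
      simp [hg]
    · by_cases h2 : pmGet? pm (r + n.1, c + n.2) = some name
      · have hInv' : RegInv pm name (PySem.Set.add v (r + n.1, c + n.2)) := by
          intro x hx
          rcases (PySem.Set.mem_add _ _ _).mp hx with hv | hnp
          · exact hInv x hv
          · rw [hnp]; exact h2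
        rw [if_neg h1, if_pos h2, ih _ _ f hInv']
        simp [h2]
      · rw [if_neg h1, if_neg h2, ih v tv _ hInv]
        simp [h2]

theorem loopA_eq (pm : List (Int × Int × String)) (name : String) :
    ∀ (fuel : Nat) (tv : List (Int × Int)) (v : PySem.Set (Int × Int)) (reg : List (Int × Int))
      (f : List ((Int × Int) × (Int × Int))), RegInv pm name v →
      tv.length + 2 * unvis pm v ≤ fuel →
    ∃ Δ, loopB pm name fuel tv v reg = reg ++ Δ ∧
      loopA pm name fuel tv v reg f = (reg ++ Δ, f ++ Δ.flatMap (cellFence pm name)) := by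
  intro fuel
  induction fuel with
  | zero =>
    intro tv v reg f _ hle
    have htv : tv = [] := List.length_eq_zero_iff.mp (by omega)
    subst htv
    exact ⟨[], by simp [loopB], by simp [loopA]⟩
  | succ fuel ih =>
    intro tv v reg f hInv hle
    match tv with
    | [] => exact ⟨[], by simp [loopB], by simp [loopA]⟩
    | cur :: rest =>
      have hAB := stepAB pm name cur.1 cur.2 neighboursL v rest f
      have hf : (stepA pm name cur.1 cur.2 neighboursL (v, rest, f)).2.2 =
          f ++ cellFence pm name cur :=
        stepA_fence pm name cur.1 cur.2 neighboursL v rest f hInv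
      have hInv' : RegInv pm name (stepA pm name cur.1 cur.2 neighboursL (v, rest, f)).1 := by
        rw [hAB.1]; exact stepB_inv pm name cur.1 cur.2 neighboursL v rest hInv
      have hm := stepA_measure pm name cur.1 cur.2 neighboursL v rest f
      have hle' : (stepA pm name cur.1 cur.2 neighboursL (v, rest, f)).2.1.length +
          2 * unvis pm (stepA pm name cur.1 cur.2 neighboursL (v, rest, f)).1 ≤ fuel := by
        simp only [List.length_cons] at hle
        omega
      obtain ⟨Δ', h1, h2⟩ := ih _ _ (reg ++ [cur]) _ hInv' hle'
      refine ⟨cur :: Δ', ?_, ?_⟩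
      · show loopB pm name fuel (stepB pm name cur.1 cur.2 neighboursL (v, rest)).2
          (stepB pm name cur.1 cur.2 neighboursL (v, rest)).1 (reg ++ [cur]) = _
        rw [← hAB.1, ← hAB.2, h1]
        simp
      · show loopA pm name fuel (stepA pm name cur.1 cur.2 neighboursL (v, rest, f)).2.1
          (stepA pm name cur.1 cur.2 neighboursL (v, rest, f)).1 (reg ++ [cur])
          (stepA pm name cur.1 cur.2 neighboursL (v, rest, f)).2.2 = _
        rw [h2, hf]
        simp

theorem pmGet?_isSome_of_mem (pm : List (Int × Int × String)) (pos : Int × Int)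
    (h : pos ∈ pm.map (fun p => (p.1, p.2.1))) : (pmGet? pm pos).isSome := by
  induction pm with
  | nil => simp at h
  | cons p rest ih =>
    simp only [List.map_cons, List.mem_cons] at h
    simp only [pmGet?]
    split
    · rfl
    · rename_i hne
      apply ih
      rcases h with h | h
      · exact absurd ⟨by rw [h], by rw [h]⟩ hne
      · exact h

-- ===== VERDICT (by name: the statement is the Claim_ definition above) =====
theorem dfs_spec : Claim_equal_dfs := by
  intro pm pos seen _ hpre
  unfold Spec_dfs
  show loopA pm ((pmGet? pm pos).getD "") (1 + 2 * unvis pm (PySem.Set.ofList [pos]))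
      [pos] (PySem.Set.ofList [pos]) [] [] =
    (loopB pm ((pmGet? pm pos).getD "") (1 + 2 * unvis pm (PySem.Set.ofList [pos]))
      [pos] (PySem.Set.ofList [pos]) [],
     (loopB pm ((pmGet? pm pos).getD "") (1 + 2 * unvis pm (PySem.Set.ofList [pos]))
       [pos] (PySem.Set.ofList [pos]) []).flatMap
       (cellFence pm ((pmGet? pm pos).getD "")))
  obtain ⟨nm, hnm⟩ := Option.isSome_iff_exists.mp (pmGet?_isSome_of_mem pm pos hpre)
  have hInv : RegInv pm ((pmGet? pm pos).getD "") (PySem.Set.ofList [pos]) := by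
    intro x hx
    have hx' : x = pos := by simpa [PySem.Set.mem_ofList] using hx
    rw [hx', hnm]
    rfl
  obtain ⟨Δ, h1, h2⟩ :=
    loopA_eq pm ((pmGet? pm pos).getD "") (1 + 2 * unvis pm (PySem.Set.ofList [pos]))
      [pos] (PySem.Set.ofList [pos]) [] [] hInv (by simp)
  simp only [List.nil_append] at h1 h2
  rw [h1, h2]
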